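-- pv_equiv track=rewrite | github.com/ConvoSphere/ConvoSphere | backend/app/core/security_hardening.py | sanitize_user_data
-- ===== SOURCE A (Python) =====
-- from typing import Dict, Optional, Tuple
--
-- def sanitize_user_data(user_data: Dict) -> Dict:
--     """
--     Sanitize user data from SSO providers.
--
--     Args:
--         user_data: Raw user data
--
--     Returns:
--         Dict: Sanitized user data
--     """
--     sanitized = {}
--
--     for key, value in user_data.items():
--         if isinstance(value, str):
--             # Remove potentially dangerous characters
--             sanitized_value = value.replace('<', '&lt;').replace('>', '&gt;')
--             sanitized_value = sanitized_value.replace('"', '&quot;').replace("'", '&#x27;')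
--             sanitized[key] = sanitized_value
--         else:
--             sanitized[key] = value
--
--     return sanitized
-- ===== SOURCE B (Python) =====
-- _ESC = {'<': '&lt;', '>': '&gt;', '"': '&quot;', "'": '&#x27;'}
--
--
-- def sanitize_user_data(user_data):
--     """Sanitize user data: one left-to-right scan per string, collecting runs of
--     safe characters and splicing in escapes, instead of four chained full-string
--     replace passes."""
--     sanitized = {}
--     for key, value in user_data.items():
--         if isinstance(value, str):
--             sanitized[key] = _escape(value)
--         else:
--             sanitized[key] = value
--     return sanitized
--
--
-- def _escape(value):
--     parts = []
--     run = []
--     for c in value: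
--         esc = _ESC.get(c)
--         if esc is None:
--             run.append(c)
--         else:
--             parts.append(''.join(run))
--             parts.append(esc)
--             run = []
--     parts.append(''.join(run))
--     return ''.join(parts)
-- ===== Notes on version B (the rewrite author's own statement) =====
-- stated objective: alternative
-- what changed: Each string is escaped in one left-to-right scan that buffers runs of safe characters and splices in escape strings at dangerous characters, instead of four sequential whole-string replace passes.
import Mathlib
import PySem

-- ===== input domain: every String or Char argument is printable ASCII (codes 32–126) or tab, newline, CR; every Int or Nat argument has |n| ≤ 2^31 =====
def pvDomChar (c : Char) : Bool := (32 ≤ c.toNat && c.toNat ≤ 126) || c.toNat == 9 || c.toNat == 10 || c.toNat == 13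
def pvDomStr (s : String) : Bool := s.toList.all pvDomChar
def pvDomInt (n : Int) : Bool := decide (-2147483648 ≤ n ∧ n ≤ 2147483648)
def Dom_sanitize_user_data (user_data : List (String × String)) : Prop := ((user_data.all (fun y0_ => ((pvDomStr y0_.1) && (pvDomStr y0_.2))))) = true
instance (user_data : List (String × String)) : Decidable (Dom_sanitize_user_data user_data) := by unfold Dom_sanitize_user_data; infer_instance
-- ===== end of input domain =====

-- B escapes each string in ONE left-to-right scan that collects runs of safe characters and
-- splices in the escapes, instead of A's four chained full-string replace passes (alternative; same asymptotic cost).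

-- ===== PORT A =====
-- values are typed String here, so Python's `isinstance(value, str)` branch is always the one taken
def sanitize_user_data (user_data : List (String × String)) : List (String × String) :=
  (user_data.foldl
    (fun sanitized kv =>
      let sanitized_value := PySem.Str.replace (PySem.Str.replace kv.2 "<" "&lt;") ">" "&gt;"
      let sanitized_value2 := PySem.Str.replace (PySem.Str.replace sanitized_value "\"" "&quot;") "'" "&#x27;"
      sanitized.insert kv.1 sanitized_value2)
    (PySem.Dict.empty : PySem.Dict String String)).items

-- ===== PORT B =====
-- the module-level _ESC dict
def pvESC : PySem.Dict Char String :=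
  PySem.Dict.ofList [('<', "&lt;"), ('>', "&gt;"), ('"', "&quot;"), ('\'', "&#x27;")]

-- _escape: scan once, buffering the current run of safe characters; `run` is a list of
-- single characters, so Python's ''.join(run) is exactly String.ofList run
def pvEscape (value : String) : String :=
  let st := value.toList.foldl
    (fun (acc : List String × List Char) c =>
      match PySem.Dict.get? pvESC c with
      | none => (acc.1, acc.2 ++ [c])
      | some esc => (acc.1 ++ [String.ofList acc.2, esc], []))
    ([], [])
  PySem.Str.join "" (st.1 ++ [String.ofList st.2])

def sanitize_user_data_alt (user_data : List (String × String)) : List (String × String) :=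
  (user_data.foldl
    (fun sanitized kv => sanitized.insert kv.1 (pvEscape kv.2))
    (PySem.Dict.empty : PySem.Dict String String)).items

-- ===== PRECONDITION & SPEC =====
def Spec_sanitize_user_data (user_data : List (String × String)) (out : List (String × String)) : Prop := out = sanitize_user_data_alt user_data
instance (user_data : List (String × String)) (out : List (String × String)) : Decidable (Spec_sanitize_user_data user_data out) := by unfold Spec_sanitize_user_data; infer_instance

-- ===== CLAIM (what is proved, stated in full; the proofs are below) =====
def Claim_equal_sanitize_user_data : Prop := ∀ (user_data : List (String × String)), Dom_sanitize_user_data user_data → Spec_sanitize_user_data user_data (sanitize_user_data user_data)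

-- ===== LEMMAS AND PROOFS =====

-- per-character substitution both programs realise
def pvEscChar (c : Char) : List Char :=
  match PySem.Dict.get? pvESC c with
  | none => [c]
  | some e => e.toList

-- replace.go with a single-char pattern, enough fuel: flatMap of the one-char substitution
theorem pvGoEq (a : Char) (r : List Char) :
    ∀ (fuel : Nat) (l acc : List Char), l.length ≤ fuel →
      PySem.Chars.replace.go [a] r fuel l acc
        = acc.reverse ++ l.flatMap (fun c => if c = a then r else [c]) := by
  intro fuel
  induction fuel with
  | zero =>
    intro l acc h
    have : l = [] := List.eq_nil_of_length_eq_zero (Nat.le_zero.mp h)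
    subst this
    simp [PySem.Chars.replace.go]
  | succ n ih =>
    intro l acc h
    cases l with
    | nil => simp [PySem.Chars.replace.go]
    | cons c t =>
      have hlen : t.length ≤ n := Nat.le_of_succ_le_succ (by simpa using h)
      by_cases hc : c = a
      · subst hc
        have hif : List.isPrefixOf [c] (c :: t) = true := by simp [List.isPrefixOf]
        rw [show PySem.Chars.replace.go [c] r (n+1) (c :: t) acc
              = PySem.Chars.replace.go [c] r n t (r.reverse ++ acc) from by
            simp [PySem.Chars.replace.go, hif]]
        rw [ih t (r.reverse ++ acc) hlen]
        simp
      · have hif : List.isPrefixOf [a] (c :: t) = false := by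
          simp [List.isPrefixOf]
          exact fun h' => hc h'.symm
        rw [show PySem.Chars.replace.go [a] r (n+1) (c :: t) acc
              = PySem.Chars.replace.go [a] r n t (c :: acc) from by
            simp [PySem.Chars.replace.go, hif]]
        rw [ih t (c :: acc) hlen]
        simp [hc]

-- replace with a single-char pattern IS a flatMap
theorem pvReplOne (cs : List Char) (a : Char) (r : List Char) :
    PySem.Chars.replace cs [a] r = cs.flatMap (fun c => if c = a then r else [c]) := by
  rw [PySem.Chars.replace]
  simp only [List.isEmpty_cons, if_false, Bool.false_eq_true]
  rw [pvGoEq a r cs.length cs [] le_rfl]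
  simp

-- each character's image through A's four sequential substitutions equals pvEscChar
theorem pvPointEq (c : Char) :
    List.flatMap
      (fun x =>
        List.flatMap
          (fun x =>
            List.flatMap (fun c => if c = '\'' then "&#x27;".toList else [c])
              (if x = '"' then "&quot;".toList else [x]))
          (if x = '>' then "&gt;".toList else [x]))
      (if c = '<' then "&lt;".toList else [c]) = pvEscChar c := by
  by_cases h1 : c = '<'
  · subst h1; decide
  · by_cases h2 : c = '>'
    · subst h2; decide
    · by_cases h3 : c = '"'
      · subst h3; decide
      · by_cases h4 : c = '\''
        · subst h4; decide
        · have hget : PySem.Dict.get? pvESC c = none := by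
            simp [pvESC, PySem.Dict.get?, PySem.Dict.ofList, PySem.Dict.update, PySem.Dict.insert,
              PySem.Dict.empty]
            exact ⟨fun h => h1 h.symm, fun h => h2 h.symm, fun h => h3 h.symm, fun h => h4 h.symm⟩
          simp [pvEscChar, hget, h1, h2, h3, h4]

-- A's four chained replaces on a string are one flatMap of pvEscChar
theorem pvChainEq (v : String) :
    (PySem.Str.replace (PySem.Str.replace (PySem.Str.replace (PySem.Str.replace v "<" "&lt;") ">" "&gt;") "\"" "&quot;") "'" "&#x27;").toList
      = v.toList.flatMap pvEscChar := by
  simp only [PySem.Str.toList_replace]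
  rw [show ("<" : String).toList = ['<'] from rfl,
      show (">" : String).toList = ['>'] from rfl,
      show ("\"" : String).toList = ['"'] from rfl,
      show ("'" : String).toList = ['\''] from rfl]
  rw [pvReplOne, pvReplOne, pvReplOne, pvReplOne]
  simp only [List.flatMap_assoc]
  exact List.flatMap_congr (fun c _ => pvPointEq c)

-- ''.join over List Char pieces is flatten
theorem pvJoinNilSep (l : List (List Char)) : PySem.Chars.join [] l = l.flatten := by
  induction l with
  | nil => simp [PySem.Chars.join_nil]
  | cons x t ih =>
    cases t with
    | nil => simp [PySem.Chars.join_singleton]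
    | cons y u => rw [PySem.Chars.join_cons_cons]; simp_all

-- invariant of B's scan: the pieces collected so far plus the pending run plus the
-- escaped remainder make up the escaped string
theorem pvFoldInv (l : List Char) :
    ∀ (parts : List String) (run : List Char),
      (((l.foldl
          (fun (acc : List String × List Char) c =>
            match PySem.Dict.get? pvESC c with
            | none => (acc.1, acc.2 ++ [c])
            | some esc => (acc.1 ++ [String.ofList acc.2, esc], []))
          (parts, run)).1.map String.toList).flatten
        ++ ((l.foldl
          (fun (acc : List String × List Char) c =>
            match PySem.Dict.get? pvESC c with
            | none => (acc.1, acc.2 ++ [c])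
            | some esc => (acc.1 ++ [String.ofList acc.2, esc], []))
          (parts, run)).2))
      = (parts.map String.toList).flatten ++ run ++ l.flatMap pvEscChar := by
  induction l with
  | nil => intro parts run; simp
  | cons c t ih =>
    intro parts run
    simp only [List.foldl_cons, List.flatMap_cons]
    cases h : PySem.Dict.get? pvESC c with
    | none =>
      simpa [pvEscChar, h] using ih parts (run ++ [c])
    | some e =>
      simpa [pvEscChar, h] using ih (parts ++ [String.ofList run, e]) []

-- B's escape equals the flatMap of pvEscChar
theorem pvEscapeEq (v : String) : (pvEscape v).toList = v.toList.flatMap pvEscChar := by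
  unfold pvEscape
  simp only [PySem.Str.toList_join]
  rw [show ("" : String).toList = ([] : List Char) from rfl, pvJoinNilSep]
  have := pvFoldInv v.toList [] []
  simp only [List.map_nil, List.flatten_nil, List.nil_append] at this
  simp [this]

-- A's per-value computation equals B's
theorem pvValEq (v : String) :
    PySem.Str.replace (PySem.Str.replace (PySem.Str.replace (PySem.Str.replace v "<" "&lt;") ">" "&gt;") "\"" "&quot;") "'" "&#x27;" = pvEscape v := by
  apply String.toList_inj.mp
  rw [pvChainEq, pvEscapeEq]

-- ===== VERDICT (by name: the statement is the Claim_ definition above) =====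
theorem sanitize_user_data_spec : Claim_equal_sanitize_user_data := by
  intro user_data _
  unfold Spec_sanitize_user_data sanitize_user_data sanitize_user_data_alt
  simp only [pvValEq]
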